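-- pv_equiv track=rewrite | github.com/tom-pollak/computer-science | sof1/assessments/SOF1-Formative-1/ClosedExamination/question_1.py | create_triangle
-- ===== SOURCE A (Python) =====
-- def create_triangle(n):
--     if n < 0:
--         return None
--     triangle = ''
--     for i in range(n):
--         for j in range(n):
--             if i >= j:
--                 triangle += 'x'
--             else:
--                 triangle += '-'
--         triangle += '\n'
--     return triangle
-- ===== SOURCE B (Python) =====
-- def create_triangle(n):
--     if n < 0:
--         return None
--     return ''.join('x' * (i + 1) + '-' * (n - i - 1) + '\n' for i in range(n))
-- ===== Notes on version B (the rewrite author's own statement) =====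
-- stated objective: simpler
-- what changed: B builds each row arithmetically as 'x'*(i+1) + '-'*(n-i-1) + newline and joins the rows, removing A's inner per-cell j-loop and its i>=j comparison per character.
import Mathlib
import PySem

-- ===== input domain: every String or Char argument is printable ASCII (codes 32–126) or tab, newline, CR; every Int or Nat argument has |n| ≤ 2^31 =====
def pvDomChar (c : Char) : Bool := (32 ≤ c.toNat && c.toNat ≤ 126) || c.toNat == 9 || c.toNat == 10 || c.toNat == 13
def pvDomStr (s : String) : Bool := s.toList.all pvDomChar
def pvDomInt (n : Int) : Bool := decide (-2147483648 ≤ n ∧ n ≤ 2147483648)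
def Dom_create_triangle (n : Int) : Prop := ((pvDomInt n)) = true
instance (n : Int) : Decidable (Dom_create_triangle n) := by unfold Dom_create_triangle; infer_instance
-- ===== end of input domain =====

-- B replaces A's inner per-cell j-loop (comparison i >= j per character) by counted
-- replication 'x'*(i+1) + '-'*(n-i-1) + '\n' per row, joined; objective: simpler.

-- ===== PORT A =====
-- strings are ported through List Char (exact); the final String.ofList wraps the result
def create_triangle (n : Int) : Option String :=
  if n < 0 then none
  else
    some (String.ofList ((PySem.List.pyRange 0 n 1).foldl (fun tri i =>
      ((PySem.List.pyRange 0 n 1).foldl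
        (fun t j => t ++ (if i ≥ j then ['x'] else ['-'])) tri) ++ ['\n'])
      ([] : List Char)))

-- ===== PORT B =====
def create_triangle_alt (n : Int) : Option String :=
  if n < 0 then none
  else
    some (String.ofList (PySem.Chars.join []
      ((PySem.List.pyRange 0 n 1).map (fun i =>
        List.replicate (i + 1).toNat 'x' ++ List.replicate (n - i - 1).toNat '-' ++ ['\n']))))

-- ===== PRECONDITION & SPEC =====
def Spec_create_triangle (n : Int) (out : Option String) : Prop := out = create_triangle_alt n
instance (n : Int) (out : Option String) : Decidable (Spec_create_triangle n out) := by unfold Spec_create_triangle; infer_instance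

-- ===== CLAIM (what is proved, stated in full; the proofs are below) =====
def Claim_equal_create_triangle : Prop := ∀ (n : Int), Dom_create_triangle n → Spec_create_triangle n (create_triangle n)

-- ===== LEMMAS AND PROOFS =====

-- ''.join(parts) is concatenation
theorem pv_join_nil_eq_flatten (parts : List (List Char)) :
    PySem.Chars.join [] parts = parts.flatten := by
  induction parts with
  | nil => simp [PySem.Chars.join, List.intercalate, List.intersperse]
  | cons p ps ih =>
    cases ps with
    | nil => simp [PySem.Chars.join, List.intercalate, List.intersperse]
    | cons q qs =>
      rw [PySem.Chars.join_cons_cons] at *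
      simp_all

-- a loop that appends g x for each element builds the concatenation of the g x
theorem pv_foldl_append_of_mem {a : Type} (l : List a)
    (f : List Char -> a -> List Char) (g : a -> List Char)
    (h : forall t x, x ∈ l -> f t x = t ++ g x) (acc : List Char) :
    l.foldl f acc = acc ++ (l.map g).flatten := by
  induction l generalizing acc with
  | nil => simp
  | cons x xs ih =>
    rw [List.foldl_cons, h acc x (by simp), ih (fun t y hy => h t y (by simp [hy]))]
    simp

-- one constant character per element is a replicate
theorem pv_flatten_const_singleton {a : Type} (l : List a) (c : Char) :
    (l.map (fun _ => [c])).flatten = List.replicate l.length c := by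
  induction l with
  | nil => simp
  | cons x xs ih => simp [List.replicate_succ]

-- A's inner j-loop over range(n) produces i+1 'x's then n-i-1 '-'s
theorem pv_row_eq (n i : Int) (hi0 : 0 ≤ i) (hin : i < n) (t : List Char) :
    (PySem.List.pyRange 0 n 1).foldl
        (fun t j => t ++ (if i ≥ j then ['x'] else ['-'])) t
      = t ++ (List.replicate (i + 1).toNat 'x' ++ List.replicate (n - i - 1).toNat '-') := by
  rw [pv_foldl_append_of_mem _ _ (fun j => if i ≥ j then ['x'] else ['-'])
      (fun t x _ => rfl)]
  rw [PySem.List.pyRange_one_append 0 (i + 1) n (by omega) (by omega),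
      List.map_append, List.flatten_append]
  have e1 : (PySem.List.pyRange 0 (i + 1) 1).map (fun j => if i ≥ j then ['x'] else ['-'])
      = (PySem.List.pyRange 0 (i + 1) 1).map (fun _ => ['x']) := by
    refine List.map_congr_left ?_
    intro x hx
    rw [PySem.List.mem_pyRange_one] at hx
    simp [show i ≥ x by omega]
  have e2 : (PySem.List.pyRange (i + 1) n 1).map (fun j => if i ≥ j then ['x'] else ['-'])
      = (PySem.List.pyRange (i + 1) n 1).map (fun _ => ['-']) := by
    refine List.map_congr_left ?_
    intro x hx
    rw [PySem.List.mem_pyRange_one] at hx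
    simp [show ¬ i ≥ x by omega]
  rw [e1, e2]
  rw [pv_flatten_const_singleton, pv_flatten_const_singleton,
      PySem.List.length_pyRange_one, PySem.List.length_pyRange_one]
  have h1 : (i + 1 - 0) = i + 1 := by omega
  have h2 : (n - (i + 1)) = n - i - 1 := by omega
  rw [h1, h2]

-- ===== VERDICT (by name: the statement is the Claim_ definition above) =====
theorem create_triangle_spec : Claim_equal_create_triangle := by
  intro n _
  unfold Spec_create_triangle create_triangle create_triangle_alt
  by_cases hn : n < 0
  · simp [hn]
  · simp only [hn, if_false, Option.some.injEq]
    congr 1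
    rw [pv_foldl_append_of_mem _ _
        (fun i => List.replicate (i + 1).toNat 'x'
              ++ List.replicate (n - i - 1).toNat '-' ++ ['\n'])
        (by intro t x hx
            rw [PySem.List.mem_pyRange_one] at hx
            rw [pv_row_eq n x hx.1 hx.2]
            simp)]
    rw [pv_join_nil_eq_flatten]
    simp
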